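-- pv_equiv track=rewrite | github.com/verkyyi/agentfolio | scripts/adapt_one.py | order_experience_bullets
-- ===== SOURCE A (Python) =====
-- def score_bullet_relevance(bullet: dict, priority_tags: list[str]) -> int:
--     tags = set(bullet.get("tags") or [])
--     return len(tags.intersection(priority_tags))
--
-- def order_experience_bullets(
--     bullets: list[dict], priority_tags: list[str]
-- ) -> list[dict]:
--     indexed = list(enumerate(bullets))
--     indexed.sort(
--         key=lambda pair: (
--             -score_bullet_relevance(pair[1], priority_tags),
--             pair[0],
--         )
--     )
--     return [b for _, b in indexed]
-- ===== SOURCE B (Python) =====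
-- def order_experience_bullets(
--     bullets: list[dict], priority_tags: list[str]
-- ) -> list[dict]:
--     # Bucket (counting) pass by relevance score instead of a comparison sort:
--     # score each bullet once, then emit buckets from the highest score down to 0,
--     # keeping input order inside each bucket (same stability as the index tie-break).
--     scored = [
--         (len(set(b.get("tags") or []).intersection(priority_tags)), b)
--         for b in bullets
--     ]
--     if not scored:
--         return []
--     out = []
--     for s in range(max(sc for sc, _ in scored), -1, -1):
--         for sc, b in scored:
--             if sc == s:
--                 out.append(b)
--     return out
-- ===== Notes on version B (the rewrite author's own statement) =====
-- stated objective: alternative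
-- what changed: Replaces the comparison sort on the (-score, index) key by a bucket pass: each bullet is scored once, then the buckets are emitted from the maximum score down to 0, input order inside each bucket giving the same stability as the index tie-break.
import Mathlib
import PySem

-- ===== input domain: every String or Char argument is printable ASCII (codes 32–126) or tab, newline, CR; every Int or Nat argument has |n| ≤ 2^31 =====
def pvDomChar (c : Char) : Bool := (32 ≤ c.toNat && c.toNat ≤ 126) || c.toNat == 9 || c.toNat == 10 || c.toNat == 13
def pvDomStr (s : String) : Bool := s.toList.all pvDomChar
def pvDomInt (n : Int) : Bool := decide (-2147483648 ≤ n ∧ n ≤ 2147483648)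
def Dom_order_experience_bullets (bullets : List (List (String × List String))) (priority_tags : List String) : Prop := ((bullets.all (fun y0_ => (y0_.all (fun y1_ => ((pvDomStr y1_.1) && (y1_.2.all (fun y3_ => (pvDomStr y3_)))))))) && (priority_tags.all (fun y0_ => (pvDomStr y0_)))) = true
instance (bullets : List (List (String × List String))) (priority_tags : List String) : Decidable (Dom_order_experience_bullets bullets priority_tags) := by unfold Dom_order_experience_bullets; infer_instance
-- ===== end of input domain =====

-- B replaces the comparison sort on the (-score, index) key by a bucket pass: score once,
-- then concatenate the score buckets from the maximum score down to 0 (objective: alternative).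

-- ===== PORT A =====
def score_bullet_relevance (bullet : List (String × List String)) (priority_tags : List String) : Int :=
  let tags : PySem.Set String := PySem.Set.ofList (PySem.Dict.getD (PySem.Dict.mk bullet) "tags" [])
  ((PySem.Set.inter tags priority_tags).length : Int)

def order_experience_bullets (bullets : List (List (String × List String))) (priority_tags : List String) : List (List (String × List String)) :=
  let indexed := PySem.List.enumerate bullets
  let sortedIndexed := PySem.List.sorted2 indexed
      (fun pair => -(score_bullet_relevance pair.2 priority_tags)) (fun pair => pair.1)
  sortedIndexed.map (fun p => p.2)

-- ===== PORT B =====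
def pvScore (bullet : List (String × List String)) (priority_tags : List String) : Int :=
  ((PySem.Set.inter (PySem.Set.ofList (PySem.Dict.getD (PySem.Dict.mk bullet) "tags" [])) priority_tags).length : Int)

def order_experience_bullets_alt (bullets : List (List (String × List String))) (priority_tags : List String) : List (List (String × List String)) :=
  let scored := bullets.map (fun b => (pvScore b priority_tags, b))
  match PySem.List.max? (scored.map Prod.fst) (fun x => x) with
  | none => []
  | some m =>
      (PySem.List.pyRange m (-1) (-1)).foldl
        (fun out s => scored.foldl (fun out p => if p.1 == s then out ++ [p.2] else out) out) []

-- ===== PRECONDITION & SPEC =====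
def Spec_order_experience_bullets (bullets : List (List (String × List String))) (priority_tags : List String) (out : List (List (String × List String))) : Prop := out = order_experience_bullets_alt bullets priority_tags
instance (bullets : List (List (String × List String))) (priority_tags : List String) (out : List (List (String × List String))) : Decidable (Spec_order_experience_bullets bullets priority_tags out) := by unfold Spec_order_experience_bullets; infer_instance

-- ===== CLAIM (what is proved, stated in full; the proofs are below) =====
def Claim_equal_order_experience_bullets : Prop := ∀ (bullets : List (List (String × List String))) (priority_tags : List String), Dom_order_experience_bullets bullets priority_tags → Spec_order_experience_bullets bullets priority_tags (order_experience_bullets bullets priority_tags)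

-- ===== LEMMAS AND PROOFS =====

theorem pv_score_nonneg (b : List (String × List String)) (pts : List String) : 0 ≤ pvScore b pts :=
  Int.natCast_nonneg _

-- sorted2 with Int keys is sorted with the lexicographic key
theorem pv_sorted2_eq_sorted_lex {α : Type} (xs : List α) (k1 k2 : α → Int) :
    PySem.List.sorted2 xs k1 k2 false
      = PySem.List.sorted xs (fun x => toLex (k1 x, k2 x)) false := by
  rw [PySem.List.sorted_eq_foldl_insertBy]
  show xs.foldl (fun acc x => PySem.List.insertBy
      (fun a b => decide (k1 a < k1 b) || (!decide (k1 b < k1 a) && decide (k2 a < k2 b))) x acc) [] = _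
  have h : (fun (a b : α) => decide (k1 a < k1 b) || (!decide (k1 b < k1 a) && decide (k2 a < k2 b)))
      = fun a b => decide (toLex (k1 a, k2 a) < toLex (k1 b, k2 b)) := by
    funext a b
    by_cases h1 : k1 a < k1 b <;> by_cases h2 : k1 b < k1 a <;> by_cases h3 : k2 a < k2 b <;>
      simp [Prod.Lex.lt_iff, h1, h2, h3] <;> omega
  rw [h]

theorem pv_enumerate_map_snd {α : Type} : ∀ (l : List α) (s : Int),
    (PySem.List.enumerate l s).map Prod.snd = l := by
  intro l
  induction l with
  | nil => intro s; simp [PySem.List.enumerate_nil]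
  | cons x t ih => intro s; simp [PySem.List.enumerate_cons, ih]

theorem pv_enumerate_mem_snd {α : Type} : ∀ (l : List α) (s : Int) (p : Int × α),
    p ∈ PySem.List.enumerate l s → p.2 ∈ l := by
  intro l
  induction l with
  | nil => intro s p h; simp [PySem.List.enumerate_nil] at h
  | cons x t ih =>
      intro s p h
      rw [PySem.List.enumerate_cons] at h
      rcases List.mem_cons.mp h with h | h
      · subst h; simp
      · exact List.mem_cons_of_mem _ (ih _ _ h)

theorem pv_enumerate_mem_le {α : Type} : ∀ (l : List α) (s : Int) (p : Int × α),
    p ∈ PySem.List.enumerate l s → s ≤ p.1 := by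
  intro l
  induction l with
  | nil => intro s p h; simp [PySem.List.enumerate_nil] at h
  | cons x t ih =>
      intro s p h
      rw [PySem.List.enumerate_cons] at h
      rcases List.mem_cons.mp h with h | h
      · subst h; simp
      · have := ih _ _ h; omega

theorem pv_enumerate_pairwise {α : Type} : ∀ (l : List α) (s : Int),
    (PySem.List.enumerate l s).Pairwise (fun p q => p.1 < q.1) := by
  intro l
  induction l with
  | nil => intro s; simp [PySem.List.enumerate_nil]
  | cons x t ih =>
      intro s
      rw [PySem.List.enumerate_cons]
      refine List.pairwise_cons.mpr ⟨?_, ih (s + 1)⟩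
      intro q hq
      have := pv_enumerate_mem_le t (s + 1) q hq
      simp only []
      omega

-- partitioning a list by its value under f, over a duplicate-free list of values
-- covering all values occurring in l, is a permutation of l
theorem pv_flatMap_filter_perm {α : Type} (f : α → Int) :
    ∀ (vs : List Int) (l : List α), vs.Nodup → (∀ x ∈ l, f x ∈ vs) →
    (vs.flatMap (fun v => l.filter (fun x => f x == v))).Perm l := by
  intro vs
  induction vs with
  | nil =>
      intro l _ hcov
      have hl : l = [] := List.eq_nil_iff_forall_not_mem.mpr (fun x hx => by simpa using hcov x hx)
      subst hl
      exact List.Perm.nil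
  | cons v vs ih =>
      intro l hnd hcov
      rw [List.flatMap_cons]
      have hrest : vs.flatMap (fun u => l.filter (fun x => f x == u))
          = vs.flatMap (fun u => (l.filter (fun x => !(f x == v))).filter (fun x => f x == u)) := by
        refine List.flatMap_congr ?_
        intro u hu
        rw [List.filter_filter]
        refine (List.filter_congr ?_).symm
        intro x _
        by_cases hx : f x = u
        · have hne : v ≠ u := fun h => (List.nodup_cons.mp hnd).1 (h ▸ hu)
          simp [hx]
          exact fun h => hne h.symm
        · simp [hx]
      rw [hrest]
      have hperm := ih (l.filter (fun x => !(f x == v)))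
        (List.nodup_cons.mp hnd).2
        (by
          intro x hx
          rcases List.mem_filter.mp hx with ⟨hxl, hxv⟩
          have := hcov x hxl
          rcases List.mem_cons.mp this with h | h
          · exact absurd h (by simpa using hxv)
          · exact h)
      exact List.Perm.trans (List.Perm.append_left _ hperm)
        (List.filter_append_perm (fun x => f x == v) l)

-- the descending Python range m, m-1, …, 0
theorem pv_pyRange_desc (m : Int) (hm : 0 ≤ m) :
    PySem.List.pyRange m (-1) (-1) = (List.range (m.toNat + 1)).map (fun k : Nat => m - (k : Int)) := by
  simp only [PySem.List.pyRange]
  rw [if_neg (by norm_num), if_neg (by norm_num), if_pos (by omega)]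
  have hcnt : ((m - -1 + - -1 - 1) / - -1).toNat = m.toNat + 1 := by
    norm_num; omega
  rw [hcnt]
  exact List.map_congr_left (fun k hk => by omega)

theorem pv_mem_pyRange_desc (m s : Int) (hm : 0 ≤ m) :
    s ∈ PySem.List.pyRange m (-1) (-1) ↔ 0 ≤ s ∧ s ≤ m := by
  rw [pv_pyRange_desc m hm]
  simp only [List.mem_map, List.mem_range]
  constructor
  · rintro ⟨k, hk, rfl⟩; omega
  · intro h
    exact ⟨(m - s).toNat, by omega, by omega⟩

theorem pv_pyRange_desc_nodup (m : Int) (hm : 0 ≤ m) :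
    (PySem.List.pyRange m (-1) (-1)).Nodup := by
  rw [pv_pyRange_desc m hm]
  exact (List.nodup_range).map (fun a b h => by omega)

theorem pv_pyRange_desc_pairwise (m : Int) (hm : 0 ≤ m) :
    (PySem.List.pyRange m (-1) (-1)).Pairwise (fun a b => b < a) := by
  rw [pv_pyRange_desc m hm]
  exact List.pairwise_map.mpr ((List.pairwise_lt_range).imp (fun h => by omega))

-- ===== VERDICT (by name: the statement is the Claim_ definition above) =====
theorem order_experience_bullets_spec : Claim_equal_order_experience_bullets := by
  intro bullets pts _
  show (PySem.List.sorted2 (PySem.List.enumerate bullets)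
        (fun pair => -(pvScore pair.2 pts)) (fun pair => pair.1)).map (fun p => p.2)
      = (match PySem.List.max? ((bullets.map (fun b => (pvScore b pts, b))).map Prod.fst) (fun x => x) with
        | none => []
        | some m => (PySem.List.pyRange m (-1) (-1)).foldl
            (fun out s => (bullets.map (fun b => (pvScore b pts, b))).foldl
              (fun out p => if p.1 == s then out ++ [p.2] else out) out) [])
  set f : List (String × List String) → Int := fun b => pvScore b pts with hf
  set indexed := PySem.List.enumerate bullets with hidx
  set scored := bullets.map (fun b => (f b, b)) with hsc
  rcases hmax : PySem.List.max? (scored.map Prod.fst) (fun x => x) with _ | m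
  · -- empty input
    have hnil : scored.map Prod.fst = [] := (PySem.List.max?_eq_none_iff _ _).mp hmax
    have hb : bullets = [] := by simpa [hsc] using hnil
    subst hb
    simp [hidx, PySem.List.enumerate_nil, PySem.List.sorted2]
  · -- nonempty input; m is the maximal score
    have hm_mem : m ∈ scored.map Prod.fst := PySem.List.max?_mem hmax
    have hm0 : 0 ≤ m := by
      rcases List.mem_map.mp hm_mem with ⟨p, hp, rfl⟩
      rcases List.mem_map.mp hp with ⟨b, _, rfl⟩
      exact pv_score_nonneg b pts
    have hmax' : ∀ b ∈ bullets, f b ≤ m := by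
      intro b hb
      exact PySem.List.max?_isMax hmax (f b) (by
        refine List.mem_map.mpr ⟨(f b, b), ?_, rfl⟩
        exact List.mem_map.mpr ⟨b, hb, rfl⟩)
    dsimp only
    -- B side: the nested fold is the concatenation of the buckets
    have hB : (PySem.List.pyRange m (-1) (-1)).foldl
        (fun out s => scored.foldl (fun out p => if p.1 == s then out ++ [p.2] else out) out) []
        = (PySem.List.pyRange m (-1) (-1)).flatMap
            (fun s => bullets.filter (fun b => f b == s)) := by
      have hinner : ∀ (s : Int) (out : List (List (String × List String))),
          scored.foldl (fun out p => if p.1 == s then out ++ [p.2] else out) out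
            = out ++ bullets.filter (fun b => f b == s) := by
        intro s out
        rw [PySem.List.foldl_append_if (p := fun p => p.1 == s) (f := Prod.snd)]
        rw [hsc, List.filter_map, List.map_map]
        simp [Function.comp_def]
      calc (PySem.List.pyRange m (-1) (-1)).foldl
            (fun out s => scored.foldl (fun out p => if p.1 == s then out ++ [p.2] else out) out) []
          = (PySem.List.pyRange m (-1) (-1)).foldl
            (fun out s => out ++ bullets.filter (fun b => f b == s)) [] := by
            exact PySem.List.foldl_congr_mem _ _ _ _ (fun out s _ => hinner s out)
        _ = _ := by
            rw [PySem.List.foldl_append_eq_flatMap]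
            simp
    rw [hB]
    -- A side: the sorted list is the concatenation of the index-filtered buckets
    rw [pv_sorted2_eq_sorted_lex]
    set K : Int × List (String × List String) → Lex (Int × Int) :=
      fun p => toLex (-(f p.2), p.1) with hK
    set ys := (PySem.List.pyRange m (-1) (-1)).flatMap
        (fun s => indexed.filter (fun p => f p.2 == s)) with hys
    have hsorted : PySem.List.sorted indexed K false = ys := by
      refine PySem.List.sorted_eq_of_perm_of_pairwise_lt _ _ _ ?_ ?_
      · -- permutation
        rw [hys]
        refine pv_flatMap_filter_perm
          (fun p : Int × List (String × List String) => f p.2) _ _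
          (pv_pyRange_desc_nodup m hm0) ?_
        intro p hp
        rw [pv_mem_pyRange_desc _ _ hm0]
        have hmem : p.2 ∈ bullets := pv_enumerate_mem_snd bullets 0 p hp
        exact ⟨pv_score_nonneg _ _, hmax' _ hmem⟩
      · -- strictly increasing keys
        rw [hys]
        rw [List.pairwise_flatMap]
        constructor
        · intro s _
          have := (pv_enumerate_pairwise bullets 0).filter (fun p => f p.2 == s)
          refine this.imp_of_mem ?_
          intro p q hp hq hlt
          have hp' : f p.2 = s := by simpa using (List.mem_filter.mp hp).2
          have hq' : f q.2 = s := by simpa using (List.mem_filter.mp hq).2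
          simp only [hK]
          refine Prod.Lex.lt_iff.mpr (Or.inr ⟨?_, ?_⟩)
          · simp [hp', hq']
          · exact hlt
        · refine (pv_pyRange_desc_pairwise m hm0).imp_of_mem ?_
          intro s t _ _ hts p hp q hq
          have hp' : f p.2 = s := by simpa using (List.mem_filter.mp hp).2
          have hq' : f q.2 = t := by simpa using (List.mem_filter.mp hq).2
          simp only [hK]
          refine Prod.Lex.lt_iff.mpr (Or.inl ?_)
          simp only [ofLex_toLex, hp', hq']
          show (-s : Int) < -t
          omega
    rw [hsorted, hys, List.map_flatMap]
    refine List.flatMap_congr ?_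
    intro s _
    conv_rhs => rw [← pv_enumerate_map_snd bullets 0]
    rw [List.filter_map]
    simp [Function.comp_def, hidx]
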